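-- pv_equiv track=rewrite | github.com/joowop/Algorithm | 프로그래머스/lv1/12948. 핸드폰 번호 가리기/핸드폰 번호 가리기.py | solution
-- ===== SOURCE A (Python) =====
-- def solution(phone_number):
--     answer = ''
--     a = []
--     phone_number = list(phone_number)
--     a = []
--     for i in phone_number[:-4]:
--         i = "*"
--         a.append(i)
--     answer = ''.join(a) +''.join(phone_number[-4:])
--     return answer
-- ===== SOURCE B (Python) =====
-- def solution(phone_number):
--     return "*" * (len(phone_number) - 4) + phone_number[-4:]
-- ===== Notes on version B (the rewrite author's own statement) =====
-- stated objective: simpler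
-- what changed: Replaces the per-character loop that appends '*' to a list and joins it with a single closed-form expression: string repetition '*'*(len-4) concatenated with the last-4 slice (negative repetition yields '', so short inputs pass through unchanged, matching A).
import Mathlib
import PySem

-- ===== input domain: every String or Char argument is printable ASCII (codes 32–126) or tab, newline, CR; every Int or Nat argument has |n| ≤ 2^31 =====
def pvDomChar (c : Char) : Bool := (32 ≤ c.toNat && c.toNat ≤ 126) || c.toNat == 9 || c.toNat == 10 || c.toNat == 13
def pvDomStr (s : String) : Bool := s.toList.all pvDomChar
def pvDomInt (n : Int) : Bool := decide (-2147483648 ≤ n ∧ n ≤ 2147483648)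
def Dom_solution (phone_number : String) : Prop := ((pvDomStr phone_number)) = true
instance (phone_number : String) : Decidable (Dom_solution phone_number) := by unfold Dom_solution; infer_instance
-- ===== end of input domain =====

-- B replaces A's append-'*'-per-character loop + join with a closed-form
-- expression: a star string of length len-4 (clamped at 0) ++ the last-4 slice.

-- ===== PORT A =====
def solution (phone_number : String) : String :=
  -- answer = ''; a = []; phone_number = list(phone_number); a = []
  let pn : List Char := phone_number.toList
  -- for i in phone_number[:-4]: i = "*"; a.append(i)
  let a : List Char := (PySem.List.slice pn none (some (-4))).foldl (fun acc _ => acc ++ ['*']) []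
  -- answer = ''.join(a) + ''.join(phone_number[-4:])
  String.ofList a ++ String.ofList (PySem.List.slice pn (some (-4)) none)

-- ===== PORT B =====
def solution_alt (phone_number : String) : String :=
  -- "*" * (len(phone_number) - 4)  (negative count gives '', as Nat subtraction clamps)
  String.ofList (List.replicate (phone_number.toList.length - 4) '*') ++
  -- phone_number[-4:]
  String.ofList (PySem.List.slice phone_number.toList (some (-4)) none)

-- ===== PRECONDITION & SPEC =====
def Spec_solution (phone_number : String) (out : String) : Prop := out = solution_alt phone_number
instance (phone_number : String) (out : String) : Decidable (Spec_solution phone_number out) := by unfold Spec_solution; infer_instance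

-- ===== CLAIM (what is proved, stated in full; the proofs are below) =====
def Claim_equal_solution : Prop := ∀ (phone_number : String), Dom_solution phone_number → Spec_solution phone_number (solution phone_number)

-- ===== LEMMAS AND PROOFS =====
theorem foldl_append_star {α : Type} (l : List α) (acc : List Char) :
    l.foldl (fun acc _ => acc ++ ['*']) acc = acc ++ List.replicate l.length '*' := by
  induction l generalizing acc with
  | nil => simp
  | cons x xs ih =>
    simp only [List.foldl, ih]
    simp [List.replicate_succ]

-- ===== VERDICT (by name: the statement is the Claim_ definition above) =====
theorem solution_spec : Claim_equal_solution := by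
  intro pn _
  unfold Spec_solution solution solution_alt
  simp only []
  rw [foldl_append_star]
  rw [PySem.List.slice_to_neg_ofNat pn.toList 4 (by omega)]
  simp
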